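-- pv_equiv track=rewrite | github.com/Charan-013/Coding-ProblemSolving-using-Python | week 9/Day34/string_to_char_positions_problem (handout)/starter_code.py | string_to_char_positions
-- ===== SOURCE A (Python) =====
-- def string_to_char_positions(s: str) -> dict:
--     letter_positions = {}
--
--     for i in range(len(s)):
--
--         letter = s[i]
--         if letter not in letter_positions:
--             letter_positions[letter] = []
--         letter_positions[letter].append(i)
--
--     return letter_positions
-- ===== SOURCE B (Python) =====
-- def string_to_char_positions(s: str) -> dict:
--     # For each distinct character (first-occurrence order), collect its positions in one comprehension.
--     return {c: [i for i, x in enumerate(s) if x == c] for c in dict.fromkeys(s)}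
-- ===== Notes on version B (the rewrite author's own statement) =====
-- stated objective: simpler
-- what changed: Replaces the single-pass mutating dict-of-lists build with a dict comprehension over the distinct characters (dict.fromkeys) that scans the string once per distinct character to collect positions.
import Mathlib
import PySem

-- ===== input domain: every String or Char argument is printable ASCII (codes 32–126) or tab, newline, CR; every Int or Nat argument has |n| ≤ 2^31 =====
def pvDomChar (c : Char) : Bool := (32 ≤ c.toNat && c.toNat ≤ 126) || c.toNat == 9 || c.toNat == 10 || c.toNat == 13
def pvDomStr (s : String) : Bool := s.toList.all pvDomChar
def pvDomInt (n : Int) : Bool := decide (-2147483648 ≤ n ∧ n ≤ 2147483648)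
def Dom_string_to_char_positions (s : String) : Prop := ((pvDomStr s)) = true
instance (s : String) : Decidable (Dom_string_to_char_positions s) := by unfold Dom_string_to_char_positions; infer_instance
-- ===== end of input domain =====

-- B replaces A's single-pass mutating dict-of-lists build by a comprehension over the
-- distinct characters (dict.fromkeys) collecting each character's positions; same dict, simpler shape.


-- ===== PORT A =====
-- for i in range(len(s)): letter = s[i]; if letter not in d: d[letter] = []; d[letter].append(i); return d
-- (i is always in range, so '.getD ' '' for s[i] never takes its default)
def string_to_char_positions (s : String) : List (String × List Int) :=
  ((PySem.List.pyRange 0 (PySem.Str.len s) 1).foldl (fun d i =>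
      let letter := String.singleton ((PySem.Str.pyGet? s i).getD ' ')
      let d' := if d.contains letter then d else d.insert letter ([] : List Int)
      d'.modify letter [] (fun l => l ++ [i]))
    PySem.Dict.empty).items

-- ===== PORT B =====
-- {c: [i for i, x in enumerate(s) if x == c] for c in dict.fromkeys(s)}
def string_to_char_positions_alt (s : String) : List (String × List Int) :=
  (PySem.List.dedup (s.toList.map String.singleton)).map (fun c =>
    (c, ((PySem.List.enumerate s.toList 0).filter
          (fun p => String.singleton p.2 == c)).map (fun p => p.1)))

-- ===== PRECONDITION & SPEC =====
def Spec_string_to_char_positions (s : String) (out : List (String × List Int)) : Prop := out = string_to_char_positions_alt s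
instance (s : String) (out : List (String × List Int)) : Decidable (Spec_string_to_char_positions s out) := by unfold Spec_string_to_char_positions; infer_instance

-- ===== CLAIM (what is proved, stated in full; the proofs are below) =====
def Claim_equal_string_to_char_positions : Prop := ∀ (s : String), Dom_string_to_char_positions s → Spec_string_to_char_positions s (string_to_char_positions s)

-- ===== LEMMAS AND PROOFS =====

-- the contains-guard + insert [] of A's body is exactly Dict.modify with default []
lemma guard_insert_modify (d : PySem.Dict String (List Int)) (k : String) (i : Int) :
    (if d.contains k then d else d.insert k ([] : List Int)).modify k [] (fun l => l ++ [i])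
      = d.modify k [] (fun l => l ++ [i]) := by
  cases h : d.contains k <;>
    simp [h, PySem.Dict.modify, PySem.Dict.getD_insert_self,
      PySem.Dict.insert_insert_self, PySem.Dict.getD_of_not_contains]

-- A's loop, re-read as a fold over (key, index) pairs
lemma stcp_eq_pairs_fold (s : String) :
    string_to_char_positions s =
      (((PySem.List.enumerate s.toList 0).map
          (fun p => (String.singleton p.2, p.1))).foldl
        (fun d q => d.modify q.1 [] (fun l => l ++ [q.2]))
        PySem.Dict.empty).items := by
  unfold string_to_char_positions
  have h1 : PySem.List.enumerate s.toList 0 =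
      (PySem.List.pyRange 0 (PySem.List.len s.toList) 1).map
        (fun j => (j, PySem.List.pyGetD s.toList j ' ')) :=
    PySem.List.enumerate_eq_map_pyRange s.toList ' '
  rw [h1, List.foldl_map, List.foldl_map]
  have h2 : PySem.Str.len s = PySem.List.len s.toList := rfl
  rw [h2]
  congr 2
  funext d j
  exact guard_insert_modify d (String.singleton (PySem.List.pyGetD s.toList j ' ')) j


-- ===== VERDICT (by name: the statement is the Claim_ definition above) =====
theorem string_to_char_positions_spec : Claim_equal_string_to_char_positions := by
  intro s _
  show string_to_char_positions s = string_to_char_positions_alt s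
  rw [stcp_eq_pairs_fold]
  set l' := (PySem.List.enumerate s.toList 0).map (fun p => (String.singleton p.2, p.1)) with hl'
  set d := l'.foldl (fun d q => d.modify q.1 [] (fun l => l ++ [q.2])) PySem.Dict.empty with hd
  -- keys of the built dict, in order
  have hkeys : d.keys = PySem.Set.ofList (s.toList.map String.singleton) := by
    rw [hd, hl', List.foldl_map]
    have := PySem.Dict.keys_foldl_modify_key (PySem.List.enumerate s.toList 0)
      (fun p => String.singleton p.2) ([] : List Int)
      (fun _ p => fun l => l ++ [p.1]) PySem.Dict.empty
    rw [this]
    have : (PySem.List.enumerate s.toList 0).map (fun p => String.singleton p.2)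
        = s.toList.map String.singleton := by
      rw [show (fun (p : Int × Char) => String.singleton p.2)
            = String.singleton ∘ (fun (p : Int × Char) => p.2) from rfl,
          ← List.map_map, PySem.List.map_snd_enumerate]
    rw [this]
    rfl
  have hnd : d.keys.Nodup := by
    rw [hd, hl', List.foldl_map]
    exact PySem.Dict.nodup_keys_foldl_modify_key _ _ _ _ _ (by simp)
  rw [PySem.Dict.items_eq_map_keys d hnd ([] : List Int), hkeys,
      ← PySem.List.dedup_eq_ofList]
  apply List.map_congr_left
  intro k _
  have hg : d.getD k [] =
      ((PySem.List.enumerate s.toList 0).filter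
        (fun p => String.singleton p.2 == k)).map (fun p => p.1) := by
    rw [hd, PySem.Dict.getD_foldl_modify_append l' PySem.Dict.empty k, hl',
        List.filter_map, List.map_map]
    rfl
  rw [hg]
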